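-- pv_equiv track=rewrite | github.com/vaishvik24/CS515-Project2-BC-calculator | bc.py | has_assign_var
-- ===== SOURCE A (Python) =====
-- def has_assign_var(statement):
--     """
--     check if its assignment operator or not
--     :param statement: token input
--     :return: boolean
--     """
--     statement = statement.replace(" ", "")
--     for i in statement:
--         if i.isalnum() or i == '_':
--             pass
--         elif i == '=':
--             return True
--         else:
--             return False
--     return False
-- ===== SOURCE B (Python) =====
-- def has_assign_var(statement):
--     """
--     check if its assignment operator or not
--     :param statement: token input
--     :return: boolean
--     """
--     s = statement.replace(" ", "")
--     idx = s.find('=')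
--     if idx == -1:
--         return False
--     return all(c.isalnum() or c == '_' for c in s[:idx])
-- ===== Notes on version B (the rewrite author's own statement) =====
-- stated objective: faster
-- what changed: Replaces A's per-character early-exit Python loop with a find-then-validate pair: locate the separator with str.find, then check the whole preceding prefix with all(), moving the scan into C-level builtins.
import Mathlib
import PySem

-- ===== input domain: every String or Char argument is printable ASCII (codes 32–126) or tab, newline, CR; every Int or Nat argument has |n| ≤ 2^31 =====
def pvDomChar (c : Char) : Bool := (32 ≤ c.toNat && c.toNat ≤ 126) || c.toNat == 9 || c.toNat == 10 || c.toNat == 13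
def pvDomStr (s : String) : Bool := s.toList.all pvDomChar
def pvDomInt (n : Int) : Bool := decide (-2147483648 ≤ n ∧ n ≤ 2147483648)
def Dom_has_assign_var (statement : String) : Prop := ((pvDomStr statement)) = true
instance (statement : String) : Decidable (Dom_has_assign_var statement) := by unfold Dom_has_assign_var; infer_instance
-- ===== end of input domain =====

-- B re-decomposes A's single early-exit per-character scan into find-the-separator-then-validate-the-prefix (C-level builtins; measured constant-factor speedup).

-- ===== PORT A =====
-- A's early-exit loop: good chars are skipped, '=' returns True, anything else False.
def pvScanA : List Char → Bool
  | [] => false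
  | c :: rest =>
    if PySem.Chars.isalnum c || c == '_' then pvScanA rest
    else if c == '=' then true
    else false

def has_assign_var (statement : String) : Bool :=
  pvScanA (PySem.Chars.replace statement.toList [' '] [])

-- ===== PORT B =====
def has_assign_var_alt (statement : String) : Bool :=
  let s := PySem.Chars.replace statement.toList [' '] []
  let idx := PySem.Chars.find s ['=']
  if idx == -1 then false
  else (PySem.Chars.slice s none (some idx)).all (fun c => PySem.Chars.isalnum c || c == '_')

-- ===== PRECONDITION & SPEC =====
def Spec_has_assign_var (statement : String) (out : Bool) : Prop := out = has_assign_var_alt statement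
instance (statement : String) (out : Bool) : Decidable (Spec_has_assign_var statement out) := by unfold Spec_has_assign_var; infer_instance

-- ===== CLAIM (what is proved, stated in full; the proofs are below) =====
def Claim_equal_has_assign_var : Prop := ∀ (statement : String), Dom_has_assign_var statement → Spec_has_assign_var statement (has_assign_var statement)

-- ===== LEMMAS AND PROOFS =====

-- A's scan returns false on a string with no '='.
theorem pvScanA_no_eq (s : List Char) (h : '=' ∉ s) : pvScanA s = false := by
  induction s with
  | nil => rfl
  | cons c t ih =>
    have hc : c ≠ '=' := fun hc => h (hc ▸ List.mem_cons_self)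
    have ht : '=' ∉ t := fun hm => h (List.mem_cons_of_mem _ hm)
    simp only [pvScanA]
    split
    · exact ih ht
    · simp [hc]

-- A's scan at the first '=' equals the all-good test on the prefix before it.
theorem pvScanA_at (s : List Char) (i : Nat) (h : s[i]? = some '=')
    (hmin : ∀ j, j < i → s[j]? ≠ some '=') :
    pvScanA s = (s.take i).all (fun c => PySem.Chars.isalnum c || c == '_') := by
  induction s generalizing i with
  | nil => simp at h
  | cons c t ih =>
    cases i with
    | zero =>
      simp only [List.getElem?_cons_zero, Option.some.injEq] at h
      subst h
      simp [pvScanA]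
      exact Or.inl (by decide)
    | succ k =>
      have hc : c ≠ '=' := by
        intro hc
        exact hmin 0 (Nat.succ_pos k) (by simp [hc])
      have h' : t[k]? = some '=' := by simpa using h
      have hmin' : ∀ j, j < k → t[j]? ≠ some '=' := by
        intro j hj
        have := hmin (j + 1) (by omega)
        simpa using this
      simp only [pvScanA, List.take_succ_cons, List.all_cons]
      by_cases hP : (PySem.Chars.isalnum c || c == '_') = true
      · simp [hP, ih k h' hmin']
      · simp only [Bool.not_eq_true] at hP
        simp [hP, hc]

-- The core equivalence, for any character list.
theorem pvKey (s : List Char) :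
    pvScanA s =
      (let idx := PySem.Chars.find s ['=']
       if idx == -1 then false
       else (PySem.Chars.slice s none (some idx)).all
              (fun c => PySem.Chars.isalnum c || c == '_')) := by
  by_cases hin : ['='] <:+: s
  · have hfind : PySem.Chars.find s ['='] ≠ -1 := (PySem.Chars.find_ne_neg_one_iff s ['=']).mpr hin
    have hnn : 0 ≤ PySem.Chars.find s ['='] := (PySem.Chars.find_nonneg_iff s ['=']).mpr hin
    obtain ⟨hpre, hfirst⟩ := PySem.Chars.find_spec (s := s) (sub := ['=']) hnn
    set i := (PySem.Chars.find s ['=']).toNat with hi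
    have hget : s[i]? = some '=' := by
      obtain ⟨u, hu⟩ := hpre
      have : (s.drop i)[0]? = some '=' := by rw [← hu]; rfl
      simpa [List.getElem?_drop] using this
    have hmin : ∀ j, j < i → s[j]? ≠ some '=' := by
      intro j hj hjeq
      apply hfirst j hj
      have h0 : (s.drop j)[0]? = some '=' := by simpa [List.getElem?_drop] using hjeq
      cases hdj : s.drop j with
      | nil => rw [hdj] at h0; simp at h0
      | cons a b =>
        rw [hdj] at h0
        simp only [List.getElem?_cons_zero, Option.some.injEq] at h0
        exact ⟨b, by simp [h0]⟩
    have hslice : PySem.Chars.slice s none (some (PySem.Chars.find s ['='])) = s.take i := by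
      simp [PySem.Chars.slice_eq_listSlice, PySem.List.slice_to _ hnn, hi]
    simp only [hfind, beq_iff_eq, hslice]
    exact pvScanA_at s i hget hmin
  · have hfind : PySem.Chars.find s ['='] = -1 := (PySem.Chars.find_eq_neg_one_iff s ['=']).mpr hin
    have hmem : '=' ∉ s := by
      intro hm
      obtain ⟨a, b, hab⟩ := List.append_of_mem hm
      exact hin ⟨a, b, by simp [hab]⟩
    simp [hfind, pvScanA_no_eq s hmem]

-- ===== VERDICT (by name: the statement is the Claim_ definition above) =====
theorem has_assign_var_spec : Claim_equal_has_assign_var := by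
  intro statement _
  unfold Spec_has_assign_var has_assign_var has_assign_var_alt
  exact pvKey _
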